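-- pv_equiv track=rewrite | github.com/ethereum/execution-spec-tests | scripts/transfer_issues.py | translate_label
-- ===== SOURCE A (Python) =====
-- LABEL_MAP = {
--     "custom": "to-custom",
-- }
--
-- def translate_label(label: str) -> str:
--     """Translate a label according to the mapping."""
--     label_lower = label.lower()
--
--     # Check for exact match first (case-insensitive)
--     for old_label, new_label in LABEL_MAP.items():
--         if label_lower == old_label.lower():
--             return new_label
--
--     # Check for prefix match (for "custom label" -> "to-custom")
--     for old_label, new_label in LABEL_MAP.items():
--         if label_lower.startswith(old_label.lower()):
--             return new_label
--
--     return label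
-- ===== SOURCE B (Python) =====
-- LABEL_MAP = {
--     "custom": "to-custom",
-- }
--
-- def translate_label(label: str) -> str:
--     """Translate a label according to the mapping (single pass: exact match implies prefix match)."""
--     label_lower = label.lower()
--     for old_label, new_label in LABEL_MAP.items():
--         if label_lower.startswith(old_label.lower()):
--             return new_label
--     return label
-- ===== Notes on version B (the rewrite author's own statement) =====
-- stated objective: simpler
-- what changed: Collapses A's two scans (exact-match pass then prefix-match pass) into one prefix-match pass over LABEL_MAP, valid because an exact case-insensitive match always satisfies startswith.
import Mathlib
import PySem

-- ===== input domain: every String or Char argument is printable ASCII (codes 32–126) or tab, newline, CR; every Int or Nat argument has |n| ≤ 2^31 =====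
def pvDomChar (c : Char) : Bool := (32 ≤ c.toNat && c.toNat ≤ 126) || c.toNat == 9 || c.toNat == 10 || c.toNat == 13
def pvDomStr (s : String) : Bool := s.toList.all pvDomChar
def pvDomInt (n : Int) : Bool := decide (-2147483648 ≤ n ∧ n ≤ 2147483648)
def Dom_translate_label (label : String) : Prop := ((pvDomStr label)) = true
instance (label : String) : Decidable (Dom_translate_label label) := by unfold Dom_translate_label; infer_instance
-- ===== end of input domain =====

-- B collapses A's two map scans (exact then prefix) into one prefix scan; objective: simpler.


-- ===== PORT A =====
def LABEL_MAP : List (String × String) := [("custom", "to-custom")]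

-- first loop of A: exact (case-insensitive) match
def pvExactPass (labelLower : String) : List (String × String) → Option String
  | [] => none
  | (o, n) :: rest =>
    if labelLower == PySem.Str.lower o then some n else pvExactPass labelLower rest

-- second loop of A: prefix match
def pvPrefixPass (labelLower : String) : List (String × String) → Option String
  | [] => none
  | (o, n) :: rest =>
    if PySem.Str.startswith labelLower (PySem.Str.lower o) then some n
    else pvPrefixPass labelLower rest

def translate_label (label : String) : String :=
  let labelLower := PySem.Str.lower label
  match pvExactPass labelLower LABEL_MAP with
  | some n => n
  | none =>
    match pvPrefixPass labelLower LABEL_MAP with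
    | some n => n
    | none => label

-- ===== PORT B =====
-- B's single loop: prefix match only
def pvSinglePass (labelLower : String) : List (String × String) → Option String
  | [] => none
  | (o, n) :: rest =>
    if PySem.Str.startswith labelLower (PySem.Str.lower o) then some n
    else pvSinglePass labelLower rest

def translate_label_alt (label : String) : String :=
  match pvSinglePass (PySem.Str.lower label) LABEL_MAP with
  | some n => n
  | none => label

-- ===== PRECONDITION & SPEC =====
def Spec_translate_label (label : String) (out : String) : Prop := out = translate_label_alt label
instance (label : String) (out : String) : Decidable (Spec_translate_label label out) := by unfold Spec_translate_label; infer_instance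

-- ===== CLAIM (what is proved, stated in full; the proofs are below) =====
def Claim_equal_translate_label : Prop := ∀ (label : String), Dom_translate_label label → Spec_translate_label label (translate_label label)

-- ===== LEMMAS AND PROOFS =====
-- ===== VERDICT (by name: the statement is the Claim_ definition above) =====
theorem translate_label_spec : Claim_equal_translate_label := by
  intro label _
  unfold Spec_translate_label translate_label translate_label_alt
  have h1 : PySem.Str.lower "custom" = "custom" := by decide
  simp only [LABEL_MAP, pvExactPass, pvPrefixPass, pvSinglePass, h1]
  by_cases h : PySem.Str.lower label = "custom"
  · have h2 : PySem.Chars.lower label.toList = ['c', 'u', 's', 't', 'o', 'm'] := by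
      have := congrArg String.toList h
      simpa using this
    have h3 : PySem.Chars.startswith ['c', 'u', 's', 't', 'o', 'm']
        ['c', 'u', 's', 't', 'o', 'm'] = true := by decide
    simp [h, h2, h3]
  · simp [h]
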